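-- pv_equiv track=rewrite | github.com/awd2211/next-video-site | backend/app/utils/av1_transcoder.py | create_master_playlist
-- ===== SOURCE A (Python) =====
-- from typing import Dict, List, Optional
--
-- def create_master_playlist(
--     video_id: int,
--     resolutions: Dict[str, str],
--     format_type: str = 'av1'
-- ) -> str:
--     """
--     生成HLS Master Playlist
--
--     Args:
--         video_id: 视频ID
--         resolutions: {'1080p': 'videos/123/av1/1080p/index.m3u8', ...}
--         format_type: 'av1' or 'h264'
--
--     Returns:
--         Master playlist内容
--     """
--     playlist = "#EXTM3U\n"
--     playlist += "#EXT-X-VERSION:3\n\n"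
--
--     # 分辨率配置
--     resolution_configs = {
--         '1080p': {'bandwidth': 2200000, 'width': 1920, 'height': 1080},
--         '720p':  {'bandwidth': 1200000, 'width': 1280, 'height': 720},
--         '480p':  {'bandwidth': 600000,  'width': 854,  'height': 480},
--         '360p':  {'bandwidth': 400000,  'width': 640,  'height': 360},
--     }
--
--     # 编解码器声明
--     # AV1: av01.0.05M.08 (Profile 0, Level 5.0, Main Tier, 8-bit)
--     # H.264: avc1.64001f (High Profile, Level 3.1)
--     codec = 'av01.0.05M.08,opus' if format_type == 'av1' else 'avc1.64001f,mp4a.40.2'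
--
--     # 按分辨率从高到低排序
--     sorted_resolutions = sorted(
--         resolutions.items(),
--         key=lambda x: resolution_configs.get(x[0], {}).get('height', 0),
--         reverse=True
--     )
--
--     for res, url in sorted_resolutions:
--         config = resolution_configs.get(res, {})
--         if not config:
--             continue
--
--         playlist += f'#EXT-X-STREAM-INF:BANDWIDTH={config["bandwidth"]},'
--         playlist += f'RESOLUTION={config["width"]}x{config["height"]},'
--         playlist += f'CODECS="{codec}"\n'
--         playlist += f'{url}\n\n'
--
--     return playlist
-- ===== SOURCE B (Python) =====
-- # B: no runtime sort -- walk the known resolutions in fixed descending order,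
-- # emitting a block for every input entry with that name.
-- _LADDER = [
--     ('1080p', 2200000, 1920, 1080),
--     ('720p',  1200000, 1280, 720),
--     ('480p',  600000,  854,  480),
--     ('360p',  400000,  640,  360),
-- ]
--
-- def create_master_playlist(
--     video_id: int,
--     resolutions,
--     format_type: str = 'av1'
-- ) -> str:
--     codec = 'av01.0.05M.08,opus' if format_type == 'av1' else 'avc1.64001f,mp4a.40.2'
--     out = "#EXTM3U\n#EXT-X-VERSION:3\n\n"
--     for name, bandwidth, width, height in _LADDER:
--         for res, url in resolutions.items():
--             if res == name:
--                 out += (f'#EXT-X-STREAM-INF:BANDWIDTH={bandwidth},'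
--                         f'RESOLUTION={width}x{height},CODECS="{codec}"\n'
--                         f'{url}\n\n')
--     return out
-- ===== Notes on version B (the rewrite author's own statement) =====
-- stated objective: simpler
-- what changed: B drops A's runtime stable sort with a height-lookup key and instead walks the fixed descending resolution ladder ('1080p','720p','480p','360p'), emitting a stream block for every input entry bearing that name.
import Mathlib
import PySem

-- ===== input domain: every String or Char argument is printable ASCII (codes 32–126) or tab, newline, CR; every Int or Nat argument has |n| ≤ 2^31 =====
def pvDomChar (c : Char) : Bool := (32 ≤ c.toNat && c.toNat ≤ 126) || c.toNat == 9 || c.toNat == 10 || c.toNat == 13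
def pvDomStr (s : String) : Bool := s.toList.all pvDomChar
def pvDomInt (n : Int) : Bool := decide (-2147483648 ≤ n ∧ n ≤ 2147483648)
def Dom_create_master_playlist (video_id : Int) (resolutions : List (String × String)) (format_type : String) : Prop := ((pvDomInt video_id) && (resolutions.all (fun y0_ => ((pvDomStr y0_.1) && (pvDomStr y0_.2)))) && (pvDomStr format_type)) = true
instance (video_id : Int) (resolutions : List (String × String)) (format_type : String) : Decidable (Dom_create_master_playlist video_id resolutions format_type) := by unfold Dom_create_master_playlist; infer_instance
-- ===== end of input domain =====

-- B replaces A's runtime sort-with-key by a walk over the fixed descending resolution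
-- ladder, emitting a block for every input entry bearing that name (objective: simpler).

-- ===== PORT A =====
-- the literal dict `resolution_configs` of A
def pvConfigs : PySem.Dict String (PySem.Dict String Int) :=
  PySem.Dict.mk
    [("1080p", PySem.Dict.mk [("bandwidth", 2200000), ("width", 1920), ("height", 1080)]),
     ("720p",  PySem.Dict.mk [("bandwidth", 1200000), ("width", 1280), ("height", 720)]),
     ("480p",  PySem.Dict.mk [("bandwidth", 600000),  ("width", 854),  ("height", 480)]),
     ("360p",  PySem.Dict.mk [("bandwidth", 400000),  ("width", 640),  ("height", 360)])]

-- the sort key lambda of A: resolution_configs.get(x[0], {}).get('height', 0)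
def pvKey (resolution_configs : PySem.Dict String (PySem.Dict String Int)) (x : String × String) : Int :=
  (resolution_configs.getD x.1 (PySem.Dict.mk [])).getD "height" 0

-- A's loop body ('continue' on an empty config; config["bandwidth"] etc. ported with
-- getD, exact here because every non-empty config literally carries these three keys)
def pvABody (codec : String) (playlist : String) (ru : String × String) : String :=
  let config := pvConfigs.getD ru.1 (PySem.Dict.mk [])
  if config.items.isEmpty then playlist
  else
    let playlist := playlist ++ "#EXT-X-STREAM-INF:BANDWIDTH=" ++ PySem.Int.toStr (config.getD "bandwidth" 0) ++ ","
    let playlist := playlist ++ "RESOLUTION=" ++ PySem.Int.toStr (config.getD "width" 0) ++ "x" ++ PySem.Int.toStr (config.getD "height" 0) ++ ","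
    let playlist := playlist ++ "CODECS=\"" ++ codec ++ "\"\n"
    playlist ++ ru.2 ++ "\n\n"

def create_master_playlist (video_id : Int) (resolutions : List (String × String)) (format_type : String) : String :=
  let playlist := "#EXTM3U\n"
  let playlist := playlist ++ "#EXT-X-VERSION:3\n\n"
  let codec := if format_type == "av1" then "av01.0.05M.08,opus" else "avc1.64001f,mp4a.40.2"
  let sorted_resolutions := PySem.List.sorted resolutions (pvKey pvConfigs) true
  sorted_resolutions.foldl (pvABody codec) playlist

-- ===== PORT B =====
-- the fixed descending ladder of B
def pvLadder : List (String × Int × Int × Int) :=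
  [("1080p", 2200000, 1920, 1080),
   ("720p",  1200000, 1280, 720),
   ("480p",  600000,  854,  480),
   ("360p",  400000,  640,  360)]

-- B's inner loop body: emit a block when the entry bears the ladder name
def pvBBody (codec : String) (e : String × Int × Int × Int) (out : String) (ru : String × String) : String :=
  if ru.1 == e.1 then
    out ++ "#EXT-X-STREAM-INF:BANDWIDTH=" ++ PySem.Int.toStr e.2.1 ++ ",RESOLUTION=" ++
      PySem.Int.toStr e.2.2.1 ++ "x" ++ PySem.Int.toStr e.2.2.2 ++ ",CODECS=\"" ++ codec ++ "\"\n" ++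
      ru.2 ++ "\n\n"
  else out

def create_master_playlist_alt (video_id : Int) (resolutions : List (String × String)) (format_type : String) : String :=
  let codec := if format_type == "av1" then "av01.0.05M.08,opus" else "avc1.64001f,mp4a.40.2"
  pvLadder.foldl (fun out e => resolutions.foldl (pvBBody codec e) out) "#EXTM3U\n#EXT-X-VERSION:3\n\n"

-- ===== PRECONDITION & SPEC =====
def Spec_create_master_playlist (video_id : Int) (resolutions : List (String × String)) (format_type : String) (out : String) : Prop := out = create_master_playlist_alt video_id resolutions format_type
instance (video_id : Int) (resolutions : List (String × String)) (format_type : String) (out : String) : Decidable (Spec_create_master_playlist video_id resolutions format_type out) := by unfold Spec_create_master_playlist; infer_instance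

-- ===== CLAIM (what is proved, stated in full; the proofs are below) =====
def Claim_equal_create_master_playlist : Prop := ∀ (video_id : Int) (resolutions : List (String × String)) (format_type : String), Dom_create_master_playlist video_id resolutions format_type → Spec_create_master_playlist video_id resolutions format_type (create_master_playlist video_id resolutions format_type)

-- ===== LEMMAS AND PROOFS =====

-- the filter of entries bearing a given name, and of entries bearing no known name
def pvF (v : String) (xs : List (String × String)) : List (String × String) :=
  xs.filter (fun p => p.1 == v)
def pvF0 (xs : List (String × String)) : List (String × String) :=
  xs.filter (fun p => !(p.1 == "1080p" || p.1 == "720p" || p.1 == "480p" || p.1 == "360p"))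

lemma pvKey_other (y : String × String)
    (h1 : y.1 ≠ "1080p") (h2 : y.1 ≠ "720p") (h3 : y.1 ≠ "480p") (h4 : y.1 ≠ "360p") :
    pvKey pvConfigs y = 0 := by
  have e1 : ("1080p" == y.1) = false := by simp [Ne.symm h1]
  have e2 : ("720p" == y.1) = false := by simp [Ne.symm h2]
  have e3 : ("480p" == y.1) = false := by simp [Ne.symm h3]
  have e4 : ("360p" == y.1) = false := by simp [Ne.symm h4]
  simp [pvKey, pvConfigs, PySem.Dict.getD, PySem.Dict.get?, List.find?, e1, e2, e3, e4]

lemma pvKey_at (y : String × String) (v : String) (hy : y.1 = v) :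
    pvKey pvConfigs y = pvKey pvConfigs (v, "") := by
  simp [pvKey, hy]

lemma pvF_mem {v : String} {y : String × String} {ys : List (String × String)}
    (h : y ∈ pvF v ys) : y.1 = v := by
  simp [pvF, List.mem_filter] at h; exact h.2

lemma pvF0_key {y : String × String} {ys : List (String × String)}
    (h : y ∈ pvF0 ys) : pvKey pvConfigs y = 0 := by
  simp [pvF0, List.mem_filter] at h
  obtain ⟨-, ⟨⟨n1, n2⟩, n3⟩, n4⟩ := h
  exact pvKey_other y n1 n2 n3 n4

lemma pvInsertBy_no_before {α : Type} (before : α → α → Bool) (x : α) (l1 l2 : List α)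
    (h : ∀ y ∈ l1, before x y = false) :
    PySem.List.insertBy before x (l1 ++ l2) = l1 ++ PySem.List.insertBy before x l2 := by
  induction l1 with
  | nil => simp
  | cons a t ih =>
    have ha := h a (by simp)
    simp only [List.cons_append, PySem.List.insertBy, ha]
    simp [ih (fun y hy => h y (by simp [hy]))]

lemma pvInsertBy_all_before {α : Type} (before : α → α → Bool) (x : α) (l : List α)
    (h : ∀ y ∈ l, before x y = true) :
    PySem.List.insertBy before x l = x :: l := by
  cases l with
  | nil => simp [PySem.List.insertBy]
  | cons a t => simp [PySem.List.insertBy, h a (by simp)]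

-- A's stable reverse sort groups the entries by name, highest first, unknown names last
lemma pvSorted_decomp (xs : List (String × String)) :
    PySem.List.sorted xs (pvKey pvConfigs) true
      = pvF "1080p" xs ++ (pvF "720p" xs ++ (pvF "480p" xs ++ (pvF "360p" xs ++ pvF0 xs))) := by
  rw [PySem.List.sorted_rev_eq_foldl_insertBy]
  induction xs using List.reverseRecOn with
  | nil => simp [pvF, pvF0]
  | append_singleton ys x ih =>
    simp only [List.foldl_append, List.foldl_cons, List.foldl_nil]
    rw [ih]
    by_cases hx1 : x.1 = "1080p"
    · have e1 : pvF "1080p" (ys ++ [x]) = pvF "1080p" ys ++ [x] := by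
              simp [pvF, List.filter_append, hx1]
      have e2 : pvF "720p" (ys ++ [x]) = pvF "720p" ys := by
              simp [pvF, List.filter_append, hx1]
      have e3 : pvF "480p" (ys ++ [x]) = pvF "480p" ys := by
              simp [pvF, List.filter_append, hx1]
      have e4 : pvF "360p" (ys ++ [x]) = pvF "360p" ys := by
              simp [pvF, List.filter_append, hx1]
      have e0 : pvF0 (ys ++ [x]) = pvF0 ys := by
              simp [pvF0, List.filter_append, hx1]
      rw [e1, e2, e3, e4, e0]
      rw [pvInsertBy_no_before (fun a b => decide (pvKey pvConfigs b < pvKey pvConfigs a)) x (pvF "1080p" ys) (pvF "720p" ys ++ (pvF "480p" ys ++ (pvF "360p" ys ++ pvF0 ys))) (by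
              intro y hy
              show decide (pvKey pvConfigs y < pvKey pvConfigs x) = false
              rw [pvKey_at x _ hx1, pvKey_at y _ (pvF_mem hy)]; decide)]
      rw [pvInsertBy_all_before (fun a b => decide (pvKey pvConfigs b < pvKey pvConfigs a)) x (pvF "720p" ys ++ (pvF "480p" ys ++ (pvF "360p" ys ++ pvF0 ys))) (by
              intro y hy
              show decide (pvKey pvConfigs y < pvKey pvConfigs x) = true
              rw [pvKey_at x _ hx1]
              rcases List.mem_append.1 hy with hy' | hy''
              · rw [pvKey_at y _ (pvF_mem hy')]; decide
              rcases List.mem_append.1 hy'' with hy' | hy''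
              · rw [pvKey_at y _ (pvF_mem hy')]; decide
              rcases List.mem_append.1 hy'' with hy' | hy''
              · rw [pvKey_at y _ (pvF_mem hy')]; decide
              · rw [pvF0_key hy'']; decide)]
      simp
    by_cases hx2 : x.1 = "720p"
    · have e1 : pvF "1080p" (ys ++ [x]) = pvF "1080p" ys := by
              simp [pvF, List.filter_append, hx2]
      have e2 : pvF "720p" (ys ++ [x]) = pvF "720p" ys ++ [x] := by
              simp [pvF, List.filter_append, hx2]
      have e3 : pvF "480p" (ys ++ [x]) = pvF "480p" ys := by
              simp [pvF, List.filter_append, hx2]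
      have e4 : pvF "360p" (ys ++ [x]) = pvF "360p" ys := by
              simp [pvF, List.filter_append, hx2]
      have e0 : pvF0 (ys ++ [x]) = pvF0 ys := by
              simp [pvF0, List.filter_append, hx2]
      rw [e1, e2, e3, e4, e0]
      rw [pvInsertBy_no_before (fun a b => decide (pvKey pvConfigs b < pvKey pvConfigs a)) x (pvF "1080p" ys) (pvF "720p" ys ++ (pvF "480p" ys ++ (pvF "360p" ys ++ pvF0 ys))) (by
              intro y hy
              show decide (pvKey pvConfigs y < pvKey pvConfigs x) = false
              rw [pvKey_at x _ hx2, pvKey_at y _ (pvF_mem hy)]; decide)]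
      rw [pvInsertBy_no_before (fun a b => decide (pvKey pvConfigs b < pvKey pvConfigs a)) x (pvF "720p" ys) (pvF "480p" ys ++ (pvF "360p" ys ++ pvF0 ys)) (by
              intro y hy
              show decide (pvKey pvConfigs y < pvKey pvConfigs x) = false
              rw [pvKey_at x _ hx2, pvKey_at y _ (pvF_mem hy)]; decide)]
      rw [pvInsertBy_all_before (fun a b => decide (pvKey pvConfigs b < pvKey pvConfigs a)) x (pvF "480p" ys ++ (pvF "360p" ys ++ pvF0 ys)) (by
              intro y hy
              show decide (pvKey pvConfigs y < pvKey pvConfigs x) = true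
              rw [pvKey_at x _ hx2]
              rcases List.mem_append.1 hy with hy' | hy''
              · rw [pvKey_at y _ (pvF_mem hy')]; decide
              rcases List.mem_append.1 hy'' with hy' | hy''
              · rw [pvKey_at y _ (pvF_mem hy')]; decide
              · rw [pvF0_key hy'']; decide)]
      simp
    by_cases hx3 : x.1 = "480p"
    · have e1 : pvF "1080p" (ys ++ [x]) = pvF "1080p" ys := by
              simp [pvF, List.filter_append, hx3]
      have e2 : pvF "720p" (ys ++ [x]) = pvF "720p" ys := by
              simp [pvF, List.filter_append, hx3]
      have e3 : pvF "480p" (ys ++ [x]) = pvF "480p" ys ++ [x] := by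
              simp [pvF, List.filter_append, hx3]
      have e4 : pvF "360p" (ys ++ [x]) = pvF "360p" ys := by
              simp [pvF, List.filter_append, hx3]
      have e0 : pvF0 (ys ++ [x]) = pvF0 ys := by
              simp [pvF0, List.filter_append, hx3]
      rw [e1, e2, e3, e4, e0]
      rw [pvInsertBy_no_before (fun a b => decide (pvKey pvConfigs b < pvKey pvConfigs a)) x (pvF "1080p" ys) (pvF "720p" ys ++ (pvF "480p" ys ++ (pvF "360p" ys ++ pvF0 ys))) (by
              intro y hy
              show decide (pvKey pvConfigs y < pvKey pvConfigs x) = false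
              rw [pvKey_at x _ hx3, pvKey_at y _ (pvF_mem hy)]; decide)]
      rw [pvInsertBy_no_before (fun a b => decide (pvKey pvConfigs b < pvKey pvConfigs a)) x (pvF "720p" ys) (pvF "480p" ys ++ (pvF "360p" ys ++ pvF0 ys)) (by
              intro y hy
              show decide (pvKey pvConfigs y < pvKey pvConfigs x) = false
              rw [pvKey_at x _ hx3, pvKey_at y _ (pvF_mem hy)]; decide)]
      rw [pvInsertBy_no_before (fun a b => decide (pvKey pvConfigs b < pvKey pvConfigs a)) x (pvF "480p" ys) (pvF "360p" ys ++ pvF0 ys) (by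
              intro y hy
              show decide (pvKey pvConfigs y < pvKey pvConfigs x) = false
              rw [pvKey_at x _ hx3, pvKey_at y _ (pvF_mem hy)]; decide)]
      rw [pvInsertBy_all_before (fun a b => decide (pvKey pvConfigs b < pvKey pvConfigs a)) x (pvF "360p" ys ++ pvF0 ys) (by
              intro y hy
              show decide (pvKey pvConfigs y < pvKey pvConfigs x) = true
              rw [pvKey_at x _ hx3]
              rcases List.mem_append.1 hy with hy' | hy''
              · rw [pvKey_at y _ (pvF_mem hy')]; decide
              · rw [pvF0_key hy'']; decide)]
      simp
    by_cases hx4 : x.1 = "360p"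
    · have e1 : pvF "1080p" (ys ++ [x]) = pvF "1080p" ys := by
              simp [pvF, List.filter_append, hx4]
      have e2 : pvF "720p" (ys ++ [x]) = pvF "720p" ys := by
              simp [pvF, List.filter_append, hx4]
      have e3 : pvF "480p" (ys ++ [x]) = pvF "480p" ys := by
              simp [pvF, List.filter_append, hx4]
      have e4 : pvF "360p" (ys ++ [x]) = pvF "360p" ys ++ [x] := by
              simp [pvF, List.filter_append, hx4]
      have e0 : pvF0 (ys ++ [x]) = pvF0 ys := by
              simp [pvF0, List.filter_append, hx4]
      rw [e1, e2, e3, e4, e0]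
      rw [pvInsertBy_no_before (fun a b => decide (pvKey pvConfigs b < pvKey pvConfigs a)) x (pvF "1080p" ys) (pvF "720p" ys ++ (pvF "480p" ys ++ (pvF "360p" ys ++ pvF0 ys))) (by
              intro y hy
              show decide (pvKey pvConfigs y < pvKey pvConfigs x) = false
              rw [pvKey_at x _ hx4, pvKey_at y _ (pvF_mem hy)]; decide)]
      rw [pvInsertBy_no_before (fun a b => decide (pvKey pvConfigs b < pvKey pvConfigs a)) x (pvF "720p" ys) (pvF "480p" ys ++ (pvF "360p" ys ++ pvF0 ys)) (by
              intro y hy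
              show decide (pvKey pvConfigs y < pvKey pvConfigs x) = false
              rw [pvKey_at x _ hx4, pvKey_at y _ (pvF_mem hy)]; decide)]
      rw [pvInsertBy_no_before (fun a b => decide (pvKey pvConfigs b < pvKey pvConfigs a)) x (pvF "480p" ys) (pvF "360p" ys ++ pvF0 ys) (by
              intro y hy
              show decide (pvKey pvConfigs y < pvKey pvConfigs x) = false
              rw [pvKey_at x _ hx4, pvKey_at y _ (pvF_mem hy)]; decide)]
      rw [pvInsertBy_no_before (fun a b => decide (pvKey pvConfigs b < pvKey pvConfigs a)) x (pvF "360p" ys) (pvF0 ys) (by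
              intro y hy
              show decide (pvKey pvConfigs y < pvKey pvConfigs x) = false
              rw [pvKey_at x _ hx4, pvKey_at y _ (pvF_mem hy)]; decide)]
      rw [pvInsertBy_all_before (fun a b => decide (pvKey pvConfigs b < pvKey pvConfigs a)) x (pvF0 ys) (by
              intro y hy
              show decide (pvKey pvConfigs y < pvKey pvConfigs x) = true
              rw [pvKey_at x _ hx4, pvF0_key hy]; decide)]
      
      simp
    · have hk : pvKey pvConfigs x = 0 := pvKey_other x hx1 hx2 hx3 hx4
      have e1 : pvF "1080p" (ys ++ [x]) = pvF "1080p" ys := by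
              simp [pvF, List.filter_append, hx1]
      have e2 : pvF "720p" (ys ++ [x]) = pvF "720p" ys := by
              simp [pvF, List.filter_append, hx2]
      have e3 : pvF "480p" (ys ++ [x]) = pvF "480p" ys := by
              simp [pvF, List.filter_append, hx3]
      have e4 : pvF "360p" (ys ++ [x]) = pvF "360p" ys := by
              simp [pvF, List.filter_append, hx4]
      have e0 : pvF0 (ys ++ [x]) = pvF0 ys ++ [x] := by
              simp [pvF0, List.filter_append, hx1, hx2, hx3, hx4]
      rw [e1, e2, e3, e4, e0]
      rw [pvInsertBy_no_before (fun a b => decide (pvKey pvConfigs b < pvKey pvConfigs a)) x (pvF "1080p" ys) (pvF "720p" ys ++ (pvF "480p" ys ++ (pvF "360p" ys ++ pvF0 ys))) (by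
              intro y hy
              show decide (pvKey pvConfigs y < pvKey pvConfigs x) = false
              rw [hk, pvKey_at y _ (pvF_mem hy)]; decide)]
      rw [pvInsertBy_no_before (fun a b => decide (pvKey pvConfigs b < pvKey pvConfigs a)) x (pvF "720p" ys) (pvF "480p" ys ++ (pvF "360p" ys ++ pvF0 ys)) (by
              intro y hy
              show decide (pvKey pvConfigs y < pvKey pvConfigs x) = false
              rw [hk, pvKey_at y _ (pvF_mem hy)]; decide)]
      rw [pvInsertBy_no_before (fun a b => decide (pvKey pvConfigs b < pvKey pvConfigs a)) x (pvF "480p" ys) (pvF "360p" ys ++ pvF0 ys) (by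
              intro y hy
              show decide (pvKey pvConfigs y < pvKey pvConfigs x) = false
              rw [hk, pvKey_at y _ (pvF_mem hy)]; decide)]
      rw [pvInsertBy_no_before (fun a b => decide (pvKey pvConfigs b < pvKey pvConfigs a)) x (pvF "360p" ys) (pvF0 ys) (by
              intro y hy
              show decide (pvKey pvConfigs y < pvKey pvConfigs x) = false
              rw [hk, pvKey_at y _ (pvF_mem hy)]; decide)]
      rw [PySem.List.insertBy_of_forall_not_before (fun a b => decide (pvKey pvConfigs b < pvKey pvConfigs a)) x (pvF0 ys) (by
              intro y hy
              show decide (pvKey pvConfigs y < pvKey pvConfigs x) = false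
              rw [hk, pvF0_key hy]; decide)]

-- entries with no known name are skipped by A's loop
lemma pvABody_skip (codec acc : String) (p : String × String)
    (h1 : p.1 ≠ "1080p") (h2 : p.1 ≠ "720p") (h3 : p.1 ≠ "480p") (h4 : p.1 ≠ "360p") :
    pvABody codec acc p = acc := by
  have e1 : ("1080p" == p.1) = false := by simp [Ne.symm h1]
  have e2 : ("720p" == p.1) = false := by simp [Ne.symm h2]
  have e3 : ("480p" == p.1) = false := by simp [Ne.symm h3]
  have e4 : ("360p" == p.1) = false := by simp [Ne.symm h4]
  simp [pvABody, pvConfigs, PySem.Dict.getD, PySem.Dict.get?, List.find?, e1, e2, e3, e4]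

lemma pvFold_zero (codec : String) (xs : List (String × String)) :
    ∀ acc, (pvF0 xs).foldl (pvABody codec) acc = acc := by
  induction xs with
  | nil => intro acc; rfl
  | cons p t ih =>
    intro acc
    by_cases h1 : p.1 = "1080p"
    · have hfil : pvF0 (p :: t) = pvF0 t := by simp [pvF0, h1]
      rw [hfil, ih]
    by_cases h2 : p.1 = "720p"
    · have hfil : pvF0 (p :: t) = pvF0 t := by simp [pvF0, h2]
      rw [hfil, ih]
    by_cases h3 : p.1 = "480p"
    · have hfil : pvF0 (p :: t) = pvF0 t := by simp [pvF0, h3]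
      rw [hfil, ih]
    by_cases h4 : p.1 = "360p"
    · have hfil : pvF0 (p :: t) = pvF0 t := by simp [pvF0, h4]
      rw [hfil, ih]
    · have hfil : pvF0 (p :: t) = p :: pvF0 t := by
        simp [pvF0, h1, h2, h3, h4]
      rw [hfil, List.foldl_cons, pvABody_skip codec acc p h1 h2 h3 h4, ih]

-- on the entries bearing one known name, A's loop body equals B's for that rung
lemma pvABody_eq_pvBBody (codec : String) (v : String) (bw w h : Int)
    (hm : (v, bw, w, h) ∈ pvLadder) (acc : String) (p : String × String) (hp : p.1 = v) :
    pvABody codec acc p = pvBBody codec (v, bw, w, h) acc p := by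
  obtain ⟨s, u⟩ := p
  simp only at hp
  subst hp
  simp only [pvLadder, List.mem_cons, List.not_mem_nil, or_false, Prod.mk.injEq] at hm
  rcases hm with ⟨rfl, rfl, rfl, rfl⟩ | ⟨rfl, rfl, rfl, rfl⟩ | ⟨rfl, rfl, rfl, rfl⟩ | ⟨rfl, rfl, rfl, rfl⟩ <;>
  · simp only [pvABody, pvBBody, pvConfigs]
    norm_num [PySem.Dict.getD, PySem.Dict.get?, List.find?]
    conv_rhs => rw [show (",RESOLUTION=" : String) = "," ++ "RESOLUTION=" from rfl,
                    show (",CODECS=\"" : String) = "," ++ "CODECS=\"" from rfl]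
    simp [String.append_assoc]

lemma pvFold_bucket (codec : String) (v : String) (bw w h : Int)
    (hm : (v, bw, w, h) ∈ pvLadder) (xs : List (String × String)) :
    ∀ acc, (pvF v xs).foldl (pvABody codec) acc
      = xs.foldl (pvBBody codec (v, bw, w, h)) acc := by
  induction xs with
  | nil => intro acc; rfl
  | cons p t ih =>
    intro acc
    by_cases hp : p.1 = v
    · have hfil : pvF v (p :: t) = p :: pvF v t := by simp [pvF, hp]
      rw [hfil, List.foldl_cons, List.foldl_cons, ih,
          pvABody_eq_pvBBody codec v bw w h hm acc p hp]
    · have hfil : pvF v (p :: t) = pvF v t := by simp [pvF, hp]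
      have hb : pvBBody codec (v, bw, w, h) acc p = acc := by simp [pvBBody, hp]
      rw [hfil, List.foldl_cons, hb, ih]

-- ===== VERDICT (by name: the statement is the Claim_ definition above) =====
theorem create_master_playlist_spec : Claim_equal_create_master_playlist := by
  intro video_id resolutions format_type _
  unfold Spec_create_master_playlist create_master_playlist create_master_playlist_alt
  simp only [pvLadder, List.foldl_cons, List.foldl_nil]
  rw [pvSorted_decomp]
  simp only [List.foldl_append]
  rw [pvFold_zero,
      pvFold_bucket _ "360p" 400000 640 360 (by simp [pvLadder]),
      pvFold_bucket _ "480p" 600000 854 480 (by simp [pvLadder]),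
      pvFold_bucket _ "720p" 1200000 1280 720 (by simp [pvLadder]),
      pvFold_bucket _ "1080p" 2200000 1920 1080 (by simp [pvLadder]),
      show ("#EXTM3U\n" ++ "#EXT-X-VERSION:3\n\n" : String) = "#EXTM3U\n#EXT-X-VERSION:3\n\n" from rfl]
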